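-- pv_equiv track=rewrite | github.com/BlackStar1979/romionsim | validation/validate_frozen_persistence.py | longest_frozen_persistence_interval
-- ===== SOURCE A (Python) =====
-- from typing import Any, Dict, List, Optional, Tuple
--
-- def longest_frozen_persistence_interval(observables: List[Tuple[bool, int]]) -> int:
--     longest = 0
--     current = 0
--     for freeze_state, visible_edges in observables:
--         if freeze_state and visible_edges > 0:
--             current += 1
--             if current > longest:
--                 longest = current
--         else:
--             current = 0
--     return longest
-- ===== SOURCE B (Python) =====
-- from itertools import groupby
-- from typing import List, Tuple
--
-- def longest_frozen_persistence_interval(observables: List[Tuple[bool, int]]) -> int: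
--     runs = groupby(f and v > 0 for f, v in observables)
--     return max((sum(1 for _ in g) for key, g in runs if key), default=0)
-- ===== Notes on version B (the rewrite author's own statement) =====
-- stated objective: idiomatic
-- what changed: Replaces the inline running counter/maximum with a group-then-reduce shape: map each pair to the predicate, partition into maximal runs with itertools.groupby, and take the max length of the True runs (default 0).
import Mathlib
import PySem

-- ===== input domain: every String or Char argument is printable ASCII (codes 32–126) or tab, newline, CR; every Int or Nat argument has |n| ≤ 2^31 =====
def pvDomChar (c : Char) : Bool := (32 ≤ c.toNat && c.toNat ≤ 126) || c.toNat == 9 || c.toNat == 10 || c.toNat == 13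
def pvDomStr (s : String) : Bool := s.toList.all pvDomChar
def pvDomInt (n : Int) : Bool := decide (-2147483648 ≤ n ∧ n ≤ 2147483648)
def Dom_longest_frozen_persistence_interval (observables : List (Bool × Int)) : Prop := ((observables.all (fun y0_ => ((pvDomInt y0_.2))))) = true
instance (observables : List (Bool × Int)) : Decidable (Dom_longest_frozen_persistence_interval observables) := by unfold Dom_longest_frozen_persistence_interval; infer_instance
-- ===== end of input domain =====

-- B replaces A's inline running counter/maximum with a group-then-reduce shape
-- (groupby into maximal runs, max length of the True runs); same behaviour, idiomatic.

-- ===== PORT A =====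
-- state = (longest, current), exactly A's loop
def longest_frozen_persistence_interval (observables : List (Bool × Int)) : Int :=
  (observables.foldl
    (fun (st : Int × Int) p =>
      if p.1 && decide (p.2 > 0) then
        (if st.2 + 1 > st.1 then st.2 + 1 else st.1, st.2 + 1)
      else (st.1, 0))
    (0, 0)).1

-- ===== PORT B =====
-- groupby on the list of predicate Bools: takeWhile/dropWhile on the head element
-- yields exactly one groupby group; keep its length if the key is true, recurse on the rest.
def pvRunsMax : List Bool → Int
  | [] => 0
  | b :: t =>
    let g := List.takeWhile (· == b) (b :: t)
    let rest := List.dropWhile (· == b) (b :: t)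
    if b then max (g.length : Int) (pvRunsMax rest) else pvRunsMax rest
termination_by bs => bs.length
decreasing_by
  all_goals
    rw [List.dropWhile_cons_of_pos (by simp)]
    exact Nat.lt_succ_of_le (List.length_dropWhile_le _ _)

def longest_frozen_persistence_interval_alt (observables : List (Bool × Int)) : Int :=
  pvRunsMax (observables.map (fun p => p.1 && decide (p.2 > 0)))

-- ===== PRECONDITION & SPEC =====
def Spec_longest_frozen_persistence_interval (observables : List (Bool × Int)) (out : Int) : Prop := out = longest_frozen_persistence_interval_alt observables
instance (observables : List (Bool × Int)) (out : Int) : Decidable (Spec_longest_frozen_persistence_interval observables out) := by unfold Spec_longest_frozen_persistence_interval; infer_instance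

-- ===== CLAIM (what is proved, stated in full; the proofs are below) =====
def Claim_equal_longest_frozen_persistence_interval : Prop := ∀ (observables : List (Bool × Int)), Dom_longest_frozen_persistence_interval observables → Spec_longest_frozen_persistence_interval observables (longest_frozen_persistence_interval observables)

-- ===== LEMMAS AND PROOFS =====

-- A's loop restricted to the booleans it actually inspects
def pvLoopA : Int → Int → List Bool → Int
  | L, _, [] => L
  | L, C, true :: t => pvLoopA (max L (C + 1)) (C + 1) t
  | L, _, false :: t => pvLoopA L 0 t

theorem pvFold_eq_loopA (obs : List (Bool × Int)) (L C : Int) :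
    (obs.foldl
      (fun (st : Int × Int) p =>
        if p.1 && decide (p.2 > 0) then
          (if st.2 + 1 > st.1 then st.2 + 1 else st.1, st.2 + 1)
        else (st.1, 0))
      (L, C)).1 = pvLoopA L C (obs.map (fun p => p.1 && decide (p.2 > 0))) := by
  induction obs generalizing L C with
  | nil => rfl
  | cons p t ih =>
    simp only [List.foldl_cons, List.map_cons]
    cases h : (p.1 && decide (p.2 > 0)) with
    | false => simp only [Bool.false_eq_true, if_neg, not_false_eq_true, pvLoopA]; exact ih L 0
    | true =>
      simp only [if_true, pvLoopA]
      have : (if C + 1 > L then C + 1 else L) = max L (C + 1) := by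
        rw [max_def]; split_ifs <;> omega
      rw [this]; exact ih _ _

theorem pvLoopA_split (bs : List Bool) : ∀ L C : Int, 0 ≤ L → 0 ≤ C →
    pvLoopA L C bs = max L (pvLoopA 0 C bs) := by
  induction bs with
  | nil =>
    intro L C hL _
    simp only [pvLoopA]
    exact (max_eq_left hL).symm
  | cons b t ih =>
    intro L C hL hC
    cases b with
    | true =>
      simp only [pvLoopA]
      rw [ih (max L (C + 1)) (C + 1) (le_max_of_le_left hL) (by omega),
          ih (max 0 (C + 1)) (C + 1) (le_max_left _ _) (by omega)]
      rw [max_eq_right (by omega : (0 : Int) ≤ C + 1)]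
      rw [max_assoc]
    | false => simpa [pvLoopA] using ih L 0 hL le_rfl

-- consuming one maximal run of `true`s from a `true`-headed list
theorem pvLoopA_true_run (t : List Bool) : ∀ L C : Int,
    pvLoopA L C (true :: t) =
      pvLoopA (max L (C + 1 + ((List.takeWhile (· == true) t).length : Int)))
        (C + 1 + ((List.takeWhile (· == true) t).length : Int))
        (List.dropWhile (· == true) t) := by
  induction t with
  | nil => intro L C; simp [pvLoopA]
  | cons x s ih =>
    intro L C
    cases x with
    | false => simp [pvLoopA, List.takeWhile, List.dropWhile]
    | true =>
      have h1 : pvLoopA L C (true :: true :: s) = pvLoopA (max L (C + 1)) (C + 1) (true :: s) := rfl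
      rw [h1, ih]
      have htk : List.takeWhile (· == true) (true :: s) = true :: List.takeWhile (· == true) s := by
        simp [List.takeWhile]
      have hdw : List.dropWhile (· == true) (true :: s) = List.dropWhile (· == true) s := by
        simp [List.dropWhile]
      rw [htk, hdw]
      set ks : Int := ((List.takeWhile (· == true) s).length : Int) with hks
      have hk : (0 : Int) ≤ ks := by positivity
      have hlen : (((true :: List.takeWhile (· == true) s)).length : Int) = ks + 1 := by
        simp [hks]
      rw [hlen]
      have e1 : C + 1 + 1 + ks = C + 1 + (ks + 1) := by ring
      rw [max_assoc, max_eq_right (show (C + 1 : Int) ≤ C + 1 + 1 + ks by omega), e1]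

-- head of a dropWhile result falsifies the predicate
theorem pvDropHead (p : Bool → Bool) : ∀ (u : List Bool) (x : Bool) (r : List Bool),
    List.dropWhile p u = x :: r → p x = false := by
  intro u
  induction u with
  | nil => intro x r h; cases h
  | cons a s ih =>
    intro x r h
    by_cases hp : p a = true
    · rw [List.dropWhile_cons_of_pos hp] at h; exact ih x r h
    · rw [List.dropWhile_cons_of_neg hp] at h
      cases h
      simpa using hp

-- pvLoopA ignores leading falses when current = 0
theorem pvLoopA_strip_false : ∀ (u : List Bool) (L : Int),
    pvLoopA L 0 u = pvLoopA L 0 (List.dropWhile (· == false) u) := by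
  intro u
  induction u with
  | nil => intro L; rfl
  | cons x r ih =>
    intro L
    cases x with
    | true => simp [List.dropWhile]
    | false =>
      have : pvLoopA L 0 (false :: r) = pvLoopA L 0 r := rfl
      rw [this, ih]
      simp [List.dropWhile]

theorem pvLoopA_eq_runsMax : ∀ (n : Nat) (bs : List Bool), bs.length ≤ n →
    pvLoopA 0 0 bs = pvRunsMax bs := by
  intro n
  induction n with
  | zero =>
    intro bs h
    have : bs = [] := List.eq_nil_of_length_eq_zero (Nat.le_zero.mp h)
    subst this
    simp [pvRunsMax, pvLoopA]
  | succ n ih =>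
    intro bs hlen
    cases bs with
    | nil => simp [pvRunsMax, pvLoopA]
    | cons b t =>
      have hlt : t.length ≤ n := by simpa using Nat.le_of_succ_le_succ hlen
      cases b with
      | false =>
        have hA : pvLoopA 0 0 (false :: t) = pvLoopA 0 0 t := rfl
        have hB : pvRunsMax (false :: t) = pvRunsMax (List.dropWhile (· == false) t) := by
          rw [pvRunsMax]
          simp [List.dropWhile]
        rw [hA, hB, pvLoopA_strip_false t 0]
        exact ih _ (le_trans (List.length_dropWhile_le _ _) hlt)
      | true =>
        rw [pvLoopA_true_run t 0 0]
        set k : Int := ((List.takeWhile (· == true) t).length : Int) with hk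
        have hk0 : 0 ≤ k := by positivity
        rw [max_eq_right (by omega : (0 : Int) ≤ 0 + 1 + k)]
        have hBs : pvRunsMax (true :: t) =
            max ((List.takeWhile (· == true) (true :: t)).length : Int)
              (pvRunsMax (List.dropWhile (· == true) (true :: t))) := by
          rw [pvRunsMax]; simp
        have htk : ((List.takeWhile (· == true) (true :: t)).length : Int) = 0 + 1 + k := by
          rw [show List.takeWhile (· == true) (true :: t)
                = true :: List.takeWhile (· == true) t from by simp [List.takeWhile]]
          simp only [List.length_cons, hk]
          push_cast; omega
        have hdw : List.dropWhile (· == true) (true :: t) = List.dropWhile (· == true) t := by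
          simp [List.dropWhile]
        rw [hBs, htk, hdw]
        cases hr : List.dropWhile (· == true) t with
        | nil =>
          simp only [pvLoopA, pvRunsMax]
          rw [max_eq_left (by omega)]
        | cons x r =>
          have hx : x = false := by
            have := pvDropHead (· == true) t x r hr
            simpa using this
          subst hx
          have hstep : pvLoopA (0 + 1 + k) (0 + 1 + k) (false :: r) =
              pvLoopA (0 + 1 + k) 0 r := rfl
          rw [hstep, pvLoopA_split r _ 0 (by omega) le_rfl]
          congr 1
          have hA2 : pvLoopA 0 0 r = pvLoopA 0 0 (false :: r) := rfl
          rw [hA2]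
          apply ih
          have : (false :: r).length = (List.dropWhile (· == true) t).length := by rw [hr]
          calc (false :: r).length = (List.dropWhile (· == true) t).length := this
            _ ≤ t.length := List.length_dropWhile_le _ _
            _ ≤ n := hlt

-- ===== VERDICT (by name: the statement is the Claim_ definition above) =====
theorem longest_frozen_persistence_interval_spec : Claim_equal_longest_frozen_persistence_interval := by
  intro obs _
  unfold Spec_longest_frozen_persistence_interval longest_frozen_persistence_interval longest_frozen_persistence_interval_alt
  rw [pvFold_eq_loopA]
  exact pvLoopA_eq_runsMax _ _ le_rfl
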